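-- pv_equiv track=rewrite | github.com/ffavela/scripts4Chimera | format2SpreadSheet.py | getRingIdxFromTNum
-- ===== SOURCE A (Python) =====
-- teles_num=[16, 16, 24, 24, 32, 32, 40, 40, 40, 40, 48, 48, 48, 48, 48,
--            48, 48, 48, 32, 32, 32, 32, 32, 32, 32, 32, 32, 32, 32, 32,
--            32, 32, 32, 16, 8]
--
-- def getRingIdxFromTNum(tNum):
--     if tNum < 0 or tNum > 1192:
--         return None
--     cumulTNum=0
--     for rIdx in range(len(teles_num)):
--         if cumulTNum <= tNum < cumulTNum+teles_num[rIdx]: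
--             return rIdx
--         cumulTNum+=teles_num[rIdx]
-- ===== SOURCE B (Python) =====
-- teles_num=[16, 16, 24, 24, 32, 32, 40, 40, 40, 40, 48, 48, 48, 48, 48,
--            48, 48, 48, 32, 32, 32, 32, 32, 32, 32, 32, 32, 32, 32, 32,
--            32, 32, 32, 16, 8]
--
-- # cumulative boundaries, built once
-- _prefix = []
-- _c = 0
-- for _t in teles_num:
--     _c += _t
--     _prefix.append(_c)
--
-- def getRingIdxFromTNum(tNum):
--     if tNum < 0 or tNum >= 1192:
--         return None
--     # binary search: first index whose cumulative boundary exceeds tNum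
--     lo, hi = 0, len(_prefix)
--     while lo < hi:
--         mid = (lo + hi) // 2
--         if _prefix[mid] <= tNum:
--             lo = mid + 1
--         else:
--             hi = mid
--     return lo
-- ===== Notes on version B (the rewrite author's own statement) =====
-- stated objective: faster
-- what changed: Replaces the per-call linear accumulate-and-compare scan with a prefix-sum boundary table built once at module load plus a binary search over it (the >=1192 guard folds in the fall-through None at tNum==1192).
import Mathlib
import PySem

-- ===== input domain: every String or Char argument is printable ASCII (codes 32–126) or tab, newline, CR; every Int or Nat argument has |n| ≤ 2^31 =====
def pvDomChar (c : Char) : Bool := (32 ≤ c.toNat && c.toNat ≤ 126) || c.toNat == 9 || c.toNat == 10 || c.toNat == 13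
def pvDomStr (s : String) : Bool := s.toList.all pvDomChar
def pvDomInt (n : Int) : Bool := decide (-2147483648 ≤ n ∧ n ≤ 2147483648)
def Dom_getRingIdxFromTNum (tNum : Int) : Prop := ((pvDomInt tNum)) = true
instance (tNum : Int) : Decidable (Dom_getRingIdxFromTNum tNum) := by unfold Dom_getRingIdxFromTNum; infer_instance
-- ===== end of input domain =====

-- B builds the cumulative-boundary table once and binary-searches it, replacing A's per-call linear accumulate-and-compare scan (objective: faster per call in the cost model; the table has a fixed 35 entries).
-- ===== PORT A =====
def telesNum : List Int := [16, 16, 24, 24, 32, 32, 40, 40, 40, 40, 48, 48, 48, 48, 48,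
  48, 48, 48, 32, 32, 32, 32, 32, 32, 32, 32, 32, 32, 32, 32, 32, 32, 32, 16, 8]

-- the for-loop of A: walk the rings, keeping cumulTNum and rIdx
def ringLoopA (ts : List Int) (cumul : Int) (rIdx : Int) (tNum : Int) : Option Int :=
  match ts with
  | [] => none
  | t :: rest =>
    if cumul ≤ tNum ∧ tNum < cumul + t then some rIdx
    else ringLoopA rest (cumul + t) (rIdx + 1) tNum

def getRingIdxFromTNum (tNum : Int) : Option Int :=
  if tNum < 0 ∨ tNum > 1192 then none
  else ringLoopA telesNum 0 0 tNum

-- ===== PORT B =====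
-- the one-time prefix-sum table build of Source B
def prefixB : List Int :=
  (telesNum.foldl (fun st t => (st.1 ++ [st.2 + t], st.2 + t)) (([] : List Int), (0 : Int))).1

-- the while-loop of Source B's binary search; fuel = hi - lo bounds the iteration count
-- (each step shrinks hi - lo, so fuel never runs out at the initial call below)
def bsearchB (p : List Int) (tNum : Int) : Nat → Nat → Nat → Nat
  | 0, lo, _ => lo
  | fuel + 1, lo, hi =>
    if lo < hi then
      let mid := (lo + hi) / 2
      if p.getD mid 0 ≤ tNum then bsearchB p tNum fuel (mid + 1) hi
      else bsearchB p tNum fuel lo mid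
    else lo

def getRingIdxFromTNum_alt (tNum : Int) : Option Int :=
  if tNum < 0 ∨ 1192 ≤ tNum then none
  else some (bsearchB prefixB tNum prefixB.length 0 prefixB.length : Int)

-- ===== PRECONDITION & SPEC =====
def Spec_getRingIdxFromTNum (tNum : Int) (out : Option Int) : Prop := out = getRingIdxFromTNum_alt tNum
instance (tNum : Int) (out : Option Int) : Decidable (Spec_getRingIdxFromTNum tNum out) := by unfold Spec_getRingIdxFromTNum; infer_instance

-- ===== CLAIM (what is proved, stated in full; the proofs are below) =====
def Claim_equal_getRingIdxFromTNum : Prop := ∀ (tNum : Int), Dom_getRingIdxFromTNum tNum → Spec_getRingIdxFromTNum tNum (getRingIdxFromTNum tNum)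

-- ===== LEMMAS AND PROOFS =====

-- ===== VERDICT (by name: the statement is the Claim_ definition above) =====
-- all inputs in [0, 1192) agree, checked by evaluation
set_option maxRecDepth 4000 in
set_option maxHeartbeats 1000000 in
lemma agree_small : ∀ n : Nat, n < 1192 → getRingIdxFromTNum (n : Int) = getRingIdxFromTNum_alt (n : Int) := by
  decide

-- ===== VERDICT =====
theorem getRingIdxFromTNum_spec : Claim_equal_getRingIdxFromTNum := by
  intro tNum _
  unfold Spec_getRingIdxFromTNum
  by_cases hneg : tNum < 0
  · simp [getRingIdxFromTNum, getRingIdxFromTNum_alt, hneg]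
  · by_cases hbig : 1192 ≤ tNum
    · by_cases h2 : tNum > 1192
      · simp [getRingIdxFromTNum, getRingIdxFromTNum_alt, hneg, hbig, h2]
      · have : tNum = 1192 := by omega
        subst this
        decide
    · have h0 : 0 ≤ tNum := by omega
      have hlt : tNum.toNat < 1192 := by omega
      have := agree_small tNum.toNat hlt
      rwa [Int.toNat_of_nonneg h0] at this
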